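-- pv_equiv track=rewrite | github.com/Camilo555/PwC-Challenge-DataEngineer | src/messaging/integration_services.py | _get_dashboards_for_metric
-- ===== SOURCE A (Python) =====
-- from typing import Any, Dict, List, Optional, Set, Callable, Union
--
-- def _get_dashboards_for_metric(metric_name: str) -> List[str]:
--     """Get dashboards that should be updated for a metric"""
--     dashboard_mapping = {
--         "ml.": ["ml_models", "ml_performance"],
--         "dq.": ["data_quality"],
--         "user.": ["user_activity"],
--         "system.": ["system_monitoring"],
--         "pipeline.": ["pipeline_status"]
--     }
--
--     affected_dashboards = []
--     for prefix, dashboards in dashboard_mapping.items():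
--         if metric_name.startswith(prefix):
--             affected_dashboards.extend(dashboards)
--
--     return affected_dashboards
-- ===== SOURCE B (Python) =====
-- from typing import List
--
--
-- def _get_dashboards_for_metric(metric_name: str) -> List[str]:
--     """Get dashboards that should be updated for a metric"""
--     dashboard_mapping = {
--         "ml.": ["ml_models", "ml_performance"],
--         "dq.": ["data_quality"],
--         "user.": ["user_activity"],
--         "system.": ["system_monitoring"],
--         "pipeline.": ["pipeline_status"],
--     }
--     idx = metric_name.find(".")
--     if idx == -1:
--         return []
--     key = metric_name[: idx + 1]
--     return list(dashboard_mapping.get(key, []))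
-- ===== Notes on version B (the rewrite author's own statement) =====
-- stated objective: idiomatic
-- what changed: The loop scanning all five prefixes with startswith is replaced by extracting the segment up to and including the first dot character and doing one keyed dict lookup (returning a fresh list).
import Mathlib
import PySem

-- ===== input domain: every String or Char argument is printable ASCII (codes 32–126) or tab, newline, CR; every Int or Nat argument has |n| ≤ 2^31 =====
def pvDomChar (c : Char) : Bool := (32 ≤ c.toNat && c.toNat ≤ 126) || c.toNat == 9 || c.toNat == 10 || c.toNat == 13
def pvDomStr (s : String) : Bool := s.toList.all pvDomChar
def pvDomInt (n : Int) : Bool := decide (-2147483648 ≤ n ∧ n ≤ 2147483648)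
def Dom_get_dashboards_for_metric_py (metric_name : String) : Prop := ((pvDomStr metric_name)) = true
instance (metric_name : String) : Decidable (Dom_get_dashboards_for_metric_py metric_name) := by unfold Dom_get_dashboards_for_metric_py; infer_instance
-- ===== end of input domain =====

-- B replaces A's five-prefix startswith loop by extracting the segment up to the first dot
-- and doing a single keyed dict lookup (idiomatic; same asymptotic cost).


-- ===== PORT A =====
-- the dashboard mapping dict literal (shared by both ports)
def pvDashboardMapping : PySem.Dict String (List String) :=
  PySem.Dict.ofList
    [("ml.", ["ml_models", "ml_performance"]),
     ("dq.", ["data_quality"]),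
     ("user.", ["user_activity"]),
     ("system.", ["system_monitoring"]),
     ("pipeline.", ["pipeline_status"])]

-- literal port of _get_dashboards_for_metric: iterate the dict items, extend on startswith
def get_dashboards_for_metric_py (metric_name : String) : List String :=
  let dashboard_mapping := pvDashboardMapping
  dashboard_mapping.items.foldl
    (fun affected_dashboards pd =>
      if PySem.Str.startswith metric_name pd.1 then affected_dashboards ++ pd.2
      else affected_dashboards) []

-- ===== PORT B =====
-- port of Source B: find the first '.', key = metric_name[:idx+1], one dict lookup
-- (Python's final list(...) copy is the identity on the returned value)
def get_dashboards_for_metric_py_alt (metric_name : String) : List String :=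
  let dashboard_mapping := pvDashboardMapping
  let idx := PySem.Str.find metric_name "."
  if idx = -1 then []
  else
    let key := PySem.Str.slice metric_name none (some (idx + 1))
    dashboard_mapping.getD key []

-- ===== PRECONDITION & SPEC =====
def Spec_get_dashboards_for_metric_py (metric_name : String) (out : List String) : Prop := out = get_dashboards_for_metric_py_alt metric_name
instance (metric_name : String) (out : List String) : Decidable (Spec_get_dashboards_for_metric_py metric_name out) := by unfold Spec_get_dashboards_for_metric_py; infer_instance

-- ===== CLAIM (what is proved, stated in full; the proofs are below) =====
def Claim_equal_get_dashboards_for_metric_py : Prop := ∀ (metric_name : String), Dom_get_dashboards_for_metric_py metric_name → Spec_get_dashboards_for_metric_py metric_name (get_dashboards_for_metric_py metric_name)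

-- ===== LEMMAS AND PROOFS =====

-- If the string has no '.', no string of the form q ++ "." is a prefix of it.
theorem pv_not_prefix_of_find_dot_neg_one (cs q : List Char)
    (h : PySem.Chars.find cs ['.'] = -1) : ¬ (q ++ ['.']) <+: cs := by
  intro ⟨t, ht⟩
  exact (PySem.Chars.find_eq_neg_one_iff cs ['.']).1 h ⟨q, t, by simpa using ht⟩

-- A dot-terminated prefix (with no earlier dot) is a prefix of cs iff cs's first-dot
-- segment cs[:find+1] is exactly that prefix.
theorem pv_prefix_dot_iff (cs q : List Char) (hq : '.' ∉ q) :
    (q ++ ['.']) <+: cs ↔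
      (0 ≤ PySem.Chars.find cs ['.'] ∧
        List.take ((PySem.Chars.find cs ['.']).toNat + 1) cs = q ++ ['.']) := by
  constructor
  · intro h
    obtain ⟨t, ht⟩ := h
    have hinf : (['.'] : List Char) <:+: cs := ⟨q, t, by simpa using ht⟩
    have h0 : 0 ≤ PySem.Chars.find cs ['.'] := (PySem.Chars.find_nonneg_iff cs ['.']).2 hinf
    obtain ⟨hpre, hmin⟩ := PySem.Chars.find_spec h0
    have hcs : cs = q ++ ('.' :: t) := by rw [← ht]; simp
    have hdropq : (['.'] : List Char) <+: List.drop q.length cs := by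
      rw [hcs, List.drop_left]
      exact ⟨t, rfl⟩
    have hle : (PySem.Chars.find cs ['.']).toNat ≤ q.length := by
      by_contra h'
      exact hmin q.length (by omega) hdropq
    have heq : (PySem.Chars.find cs ['.']).toNat = q.length := by
      rcases Nat.lt_or_ge (PySem.Chars.find cs ['.']).toNat q.length with hlt | hge
      · exfalso
        obtain ⟨u, hu⟩ := hpre
        have hhead : cs[(PySem.Chars.find cs ['.']).toNat]? = some '.' := by
          rw [← List.head?_drop, ← hu]; rfl
        have h2 : (q ++ '.' :: t)[(PySem.Chars.find cs ['.']).toNat]? =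
            q[(PySem.Chars.find cs ['.']).toNat]? := List.getElem?_append_left hlt
        have hq' : q[(PySem.Chars.find cs ['.']).toNat]? = some '.' := by
          rw [← h2, ← hcs]; exact hhead
        exact hq (List.mem_of_getElem? hq')
      · omega
    refine ⟨h0, ?_⟩
    rw [heq, hcs, show q ++ ('.' :: t) = (q ++ ['.']) ++ t by simp,
      List.take_left' (by simp)]
  · rintro ⟨_, hkey⟩
    rw [← hkey]
    exact List.take_prefix _ _

-- the concrete items list of the mapping
theorem pv_items :
    pvDashboardMapping.items
    = [("ml.", ["ml_models", "ml_performance"]),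
       ("dq.", ["data_quality"]),
       ("user.", ["user_activity"]),
       ("system.", ["system_monitoring"]),
       ("pipeline.", ["pipeline_status"])] := by decide

-- ===== VERDICT (by name: the statement is the Claim_ definition above) =====
theorem get_dashboards_for_metric_py_spec : Claim_equal_get_dashboards_for_metric_py := by
  intro s _
  unfold Spec_get_dashboards_for_metric_py
  unfold get_dashboards_for_metric_py get_dashboards_for_metric_py_alt
  dsimp only
  rw [pv_items]
  simp only [List.foldl]
  by_cases hf : PySem.Str.find s "." = -1
  · -- no dot: every startswith is false and B returns []
    have hf' : PySem.Chars.find s.toList ['.'] = -1 := by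
      simpa [PySem.Str.find_eq] using hf
    have hsw : ∀ q : List Char, '.' ∉ q →
        PySem.Chars.startswith s.toList (q ++ ['.']) = false := by
      intro q _
      rw [← Bool.not_eq_true, PySem.Chars.startswith_iff]
      exact pv_not_prefix_of_find_dot_neg_one _ _ hf'
    have b1 : PySem.Chars.startswith s.toList ['m','l','.'] = false :=
      hsw ['m','l'] (by decide)
    have b2 : PySem.Chars.startswith s.toList ['d','q','.'] = false :=
      hsw ['d','q'] (by decide)
    have b3 : PySem.Chars.startswith s.toList ['u','s','e','r','.'] = false :=
      hsw ['u','s','e','r'] (by decide)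
    have b4 : PySem.Chars.startswith s.toList ['s','y','s','t','e','m','.'] = false :=
      hsw ['s','y','s','t','e','m'] (by decide)
    have b5 : PySem.Chars.startswith s.toList ['p','i','p','e','l','i','n','e','.'] = false :=
      hsw ['p','i','p','e','l','i','n','e'] (by decide)
    simp [PySem.Str.startswith_eq, b1, b2, b3, b4, b5, hf']
  · -- there is a dot: compare the first-dot segment with each stored prefix
    have h0 : 0 ≤ PySem.Chars.find s.toList ['.'] := by
      have := PySem.Chars.neg_one_le_find s.toList ['.']
      have hf' : PySem.Chars.find s.toList ['.'] ≠ -1 := by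
        simpa [PySem.Str.find_eq] using hf
      omega
    have hfind : PySem.Str.find s "." = PySem.Chars.find s.toList ['.'] := by
      simp [PySem.Str.find_eq]
    have hfne : ¬ PySem.Chars.find s.toList ['.'] = -1 := by omega
    have hkeyL : (PySem.Str.slice s none (some (PySem.Str.find s "." + 1))).toList
        = List.take ((PySem.Chars.find s.toList ['.']).toNat + 1) s.toList := by
      rw [PySem.Str.toList_slice, PySem.Chars.slice_eq_listSlice, hfind,
          PySem.List.slice_to s.toList (b := PySem.Chars.find s.toList ['.'] + 1) (by omega),
          show (PySem.Chars.find s.toList ['.'] + 1).toNat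
            = (PySem.Chars.find s.toList ['.']).toNat + 1 from by omega]
    -- startswith p ↔ the first-dot segment equals p, for each stored prefix
    have e1 : PySem.Chars.startswith s.toList ['m','l','.'] = true ↔
        List.take ((PySem.Chars.find s.toList ['.']).toNat + 1) s.toList = ['m','l','.'] := by
      rw [PySem.Chars.startswith_iff,
          show (['m','l','.'] : List Char) = ['m','l'] ++ ['.'] from rfl,
          pv_prefix_dot_iff _ _ (by decide)]
      simp [h0]
    have e2 : PySem.Chars.startswith s.toList ['d','q','.'] = true ↔
        List.take ((PySem.Chars.find s.toList ['.']).toNat + 1) s.toList = ['d','q','.'] := by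
      rw [PySem.Chars.startswith_iff,
          show (['d','q','.'] : List Char) = ['d','q'] ++ ['.'] from rfl,
          pv_prefix_dot_iff _ _ (by decide)]
      simp [h0]
    have e3 : PySem.Chars.startswith s.toList ['u','s','e','r','.'] = true ↔
        List.take ((PySem.Chars.find s.toList ['.']).toNat + 1) s.toList = ['u','s','e','r','.'] := by
      rw [PySem.Chars.startswith_iff,
          show (['u','s','e','r','.'] : List Char) = ['u','s','e','r'] ++ ['.'] from rfl,
          pv_prefix_dot_iff _ _ (by decide)]
      simp [h0]
    have e4 : PySem.Chars.startswith s.toList ['s','y','s','t','e','m','.'] = true ↔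
        List.take ((PySem.Chars.find s.toList ['.']).toNat + 1) s.toList = ['s','y','s','t','e','m','.'] := by
      rw [PySem.Chars.startswith_iff,
          show (['s','y','s','t','e','m','.'] : List Char) = ['s','y','s','t','e','m'] ++ ['.'] from rfl,
          pv_prefix_dot_iff _ _ (by decide)]
      simp [h0]
    have e5 : PySem.Chars.startswith s.toList ['p','i','p','e','l','i','n','e','.'] = true ↔
        List.take ((PySem.Chars.find s.toList ['.']).toNat + 1) s.toList = ['p','i','p','e','l','i','n','e','.'] := by
      rw [PySem.Chars.startswith_iff,
          show (['p','i','p','e','l','i','n','e','.'] : List Char)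
            = ['p','i','p','e','l','i','n','e'] ++ ['.'] from rfl,
          pv_prefix_dot_iff _ _ (by decide)]
      simp [h0]
    -- the key string of port B, compared with each stored prefix
    have k1 : PySem.Str.slice s none (some (PySem.Str.find s "." + 1)) = "ml." ↔
        List.take ((PySem.Chars.find s.toList ['.']).toNat + 1) s.toList = ['m','l','.'] := by
      rw [← String.toList_inj, hkeyL]; simp
    have k2 : PySem.Str.slice s none (some (PySem.Str.find s "." + 1)) = "dq." ↔
        List.take ((PySem.Chars.find s.toList ['.']).toNat + 1) s.toList = ['d','q','.'] := by
      rw [← String.toList_inj, hkeyL]; simp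
    have k3 : PySem.Str.slice s none (some (PySem.Str.find s "." + 1)) = "user." ↔
        List.take ((PySem.Chars.find s.toList ['.']).toNat + 1) s.toList = ['u','s','e','r','.'] := by
      rw [← String.toList_inj, hkeyL]; simp
    have k4 : PySem.Str.slice s none (some (PySem.Str.find s "." + 1)) = "system." ↔
        List.take ((PySem.Chars.find s.toList ['.']).toNat + 1) s.toList = ['s','y','s','t','e','m','.'] := by
      rw [← String.toList_inj, hkeyL]; simp
    have k5 : PySem.Str.slice s none (some (PySem.Str.find s "." + 1)) = "pipeline." ↔
        List.take ((PySem.Chars.find s.toList ['.']).toNat + 1) s.toList = ['p','i','p','e','l','i','n','e','.'] := by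
      rw [← String.toList_inj, hkeyL]; simp
    by_cases c1 : List.take ((PySem.Chars.find s.toList ['.']).toNat + 1) s.toList = ['m','l','.']
    · rw [k1.mpr c1]
      simp [PySem.Str.startswith_eq, e1, e2, e3, e4, e5, c1, hfne,
        show pvDashboardMapping.getD "ml." [] = ["ml_models", "ml_performance"] from by decide]
    by_cases c2 : List.take ((PySem.Chars.find s.toList ['.']).toNat + 1) s.toList = ['d','q','.']
    · rw [k2.mpr c2]
      simp [PySem.Str.startswith_eq, e1, e2, e3, e4, e5, c2, hfne,
        show pvDashboardMapping.getD "dq." [] = ["data_quality"] from by decide]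
    by_cases c3 : List.take ((PySem.Chars.find s.toList ['.']).toNat + 1) s.toList = ['u','s','e','r','.']
    · rw [k3.mpr c3]
      simp [PySem.Str.startswith_eq, e1, e2, e3, e4, e5, c3, hfne,
        show pvDashboardMapping.getD "user." [] = ["user_activity"] from by decide]
    by_cases c4 : List.take ((PySem.Chars.find s.toList ['.']).toNat + 1) s.toList = ['s','y','s','t','e','m','.']
    · rw [k4.mpr c4]
      simp [PySem.Str.startswith_eq, e1, e2, e3, e4, e5, c4, hfne,
        show pvDashboardMapping.getD "system." [] = ["system_monitoring"] from by decide]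
    by_cases c5 : List.take ((PySem.Chars.find s.toList ['.']).toNat + 1) s.toList = ['p','i','p','e','l','i','n','e','.']
    · rw [k5.mpr c5]
      simp [PySem.Str.startswith_eq, e1, e2, e3, e4, e5, c5, hfne,
        show pvDashboardMapping.getD "pipeline." [] = ["pipeline_status"] from by decide]
    -- no stored prefix matches: A collects nothing, B's lookup misses
    · have g : pvDashboardMapping.getD
          (PySem.Str.slice s none (some (PySem.Chars.find s.toList ['.'] + 1))) [] = [] := by
        rw [PySem.Dict.getD, PySem.Dict.get?, pv_items]
        have n1 : PySem.Str.slice s none (some (PySem.Chars.find s.toList ['.'] + 1)) ≠ "ml." := by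
          rw [← hfind]; exact fun h => c1 (k1.mp h)
        have n2 : PySem.Str.slice s none (some (PySem.Chars.find s.toList ['.'] + 1)) ≠ "dq." := by
          rw [← hfind]; exact fun h => c2 (k2.mp h)
        have n3 : PySem.Str.slice s none (some (PySem.Chars.find s.toList ['.'] + 1)) ≠ "user." := by
          rw [← hfind]; exact fun h => c3 (k3.mp h)
        have n4 : PySem.Str.slice s none (some (PySem.Chars.find s.toList ['.'] + 1)) ≠ "system." := by
          rw [← hfind]; exact fun h => c4 (k4.mp h)
        have n5 : PySem.Str.slice s none (some (PySem.Chars.find s.toList ['.'] + 1)) ≠ "pipeline." := by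
          rw [← hfind]; exact fun h => c5 (k5.mp h)
        simp [Ne.symm n1, Ne.symm n2, Ne.symm n3, Ne.symm n4, Ne.symm n5]
      simp [PySem.Str.startswith_eq, e1, e2, e3, e4, e5, c1, c2, c3, c4, c5, hfne, g]
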